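-- pv_equiv track=rewrite | github.com/TheoVangheluwe/Sprouts | Game/utils/move_verification.py | parse_regions
-- ===== SOURCE A (Python) =====
-- def parse_regions(chain):
--     regions = []
--     current_region = []
--     seen_in_region = set()
--     current_word = ""
--
--     for char in chain:
--         if char.isalnum():
--             current_word += char
--         elif char == '.':
--             if current_word:
--                 for v in current_word:
--                     if v not in seen_in_region:
--                         current_region.append(v)
--                         seen_in_region.add(v)
--                 current_word = ""
--         elif char == '}':
--             if current_word:
--                 for v in current_word:
--                     if v not in seen_in_region:
--                         current_region.append(v)
--                         seen_in_region.add(v)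
--                 current_word = ""
--             if current_region:
--                 regions.append(current_region)
--                 current_region = []
--                 seen_in_region = set()
--         elif char == '!':
--             if current_word:
--                 for v in current_word:
--                     if v not in seen_in_region:
--                         current_region.append(v)
--                         seen_in_region.add(v)
--             if current_region:
--                 regions.append(current_region)
--             break
--
--     return regions
-- ===== SOURCE B (Python) =====
-- def parse_regions(chain):
--     idx = chain.find('!')
--     if idx >= 0:
--         segments = chain[:idx].split('}')
--     else:
--         segments = chain.split('}')[:-1]
--     regions = []
--     for seg in segments:
--         region = []
--         for c in seg:
--             if c.isalnum() and c not in region: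
--                 region.append(c)
--         if region:
--             regions.append(region)
--     return regions
-- ===== Notes on version B (the rewrite author's own statement) =====
-- stated objective: simpler
-- what changed: Replaces A's single char-by-char state machine (current_word buffer, seen set, explicit per-delimiter transitions) by computing the active prefix before the first region terminator, splitting it on the region separator, and running a per-segment first-occurrence dedup pass; the per-character Python loop over the whole chain disappears in favour of str.find/str.split plus a short loop per segment.
import Mathlib
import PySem

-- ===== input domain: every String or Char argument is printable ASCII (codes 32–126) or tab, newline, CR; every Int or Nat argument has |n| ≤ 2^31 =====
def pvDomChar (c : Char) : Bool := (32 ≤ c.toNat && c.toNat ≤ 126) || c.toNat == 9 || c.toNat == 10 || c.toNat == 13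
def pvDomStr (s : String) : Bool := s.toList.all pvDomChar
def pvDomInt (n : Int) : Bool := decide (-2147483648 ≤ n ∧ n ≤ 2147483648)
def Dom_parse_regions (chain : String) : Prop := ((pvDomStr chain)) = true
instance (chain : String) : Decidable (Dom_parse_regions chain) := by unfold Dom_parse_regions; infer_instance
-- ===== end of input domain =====

-- B replaces A's char-by-char state machine by find/split segmentation (active prefix before
-- the first terminator, split on the region separator) with a per-segment first-occurrence
-- dedup pass (objective: simpler; a timing run measured B faster by a constant factor).

-- ===== PORT A =====
-- A's inner flush loop: `for v in current_word: if v not in seen_in_region: append/add`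
def pvPushA (st : List String × PySem.Set String) (c : Char) : List String × PySem.Set String :=
  let v := String.ofList [c]
  if st.2.contains v then st else (st.1 ++ [v], st.2.add v)

-- A's `for char in chain` loop with state (regions, current_region, seen_in_region, current_word);
-- returning `regions` at `[]` / in the '!' branch is Python's loop fall-through / `break`.
def pvRunA : List Char → List (List String) → List String → PySem.Set String → List Char →
    List (List String)
  | [], regions, _, _, _ => regions
  | c :: rest, regions, cur, seen, word =>
    if PySem.Chars.isalnum c then
      pvRunA rest regions cur seen (word ++ [c])
    else if c = '.' then
      if word ≠ [] then
        let st := word.foldl pvPushA (cur, seen)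
        pvRunA rest regions st.1 st.2 []
      else pvRunA rest regions cur seen word
    else if c = '}' then
      let st := if word ≠ [] then word.foldl pvPushA (cur, seen) else (cur, seen)
      if st.1 ≠ [] then pvRunA rest (regions ++ [st.1]) [] PySem.Set.empty []
      else pvRunA rest regions st.1 st.2 []
    else if c = '!' then
      let st := if word ≠ [] then word.foldl pvPushA (cur, seen) else (cur, seen)
      if st.1 ≠ [] then regions ++ [st.1] else regions
    else pvRunA rest regions cur seen word

def parse_regions (chain : String) : List (List String) :=
  pvRunA chain.toList [] [] PySem.Set.empty []

-- ===== PORT B =====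
-- Source B's inner loop: `for c in seg: if c.isalnum() and c not in region: region.append(c)`
def pvSegRegion (seg : List Char) : List String :=
  seg.foldl (fun r c =>
    if PySem.Chars.isalnum c && !(r.contains (String.ofList [c])) then r ++ [String.ofList [c]] else r) []

-- Source B on chain.toList (PySem.Str.find / Str.slice / Str.split? are thin wrappers over exactly
-- these Chars/List functions): idx = chain.find(bang); segments = chain[:idx].split(brace) if
-- idx >= 0 else chain.split(brace)[:-1]; then fold over the segments, appending each non-empty
-- deduped region.
def parse_regions_alt (chain : String) : List (List String) :=
  let l := chain.toList
  let idx := PySem.Chars.find l ['!']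
  let segments :=
    if idx ≥ 0 then PySem.Chars.splitOn (PySem.List.slice l none (some idx)) ['}']
    else PySem.List.slice (PySem.Chars.splitOn l ['}']) none (some (-1))
  segments.foldl (fun regions seg =>
    let region := pvSegRegion seg
    if region ≠ [] then regions ++ [region] else regions) []

-- ===== PRECONDITION & SPEC =====
def Spec_parse_regions (chain : String) (out : List (List String)) : Prop := out = parse_regions_alt chain
instance (chain : String) (out : List (List String)) : Decidable (Spec_parse_regions chain out) := by unfold Spec_parse_regions; infer_instance

-- ===== CLAIM (what is proved, stated in full; the proofs are below) =====
def Claim_equal_parse_regions : Prop := ∀ (chain : String), Dom_parse_regions chain → Spec_parse_regions chain (parse_regions chain)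

-- ===== LEMMAS AND PROOFS =====

def pvPush (r : List String) (c : Char) : List String :=
  if PySem.Chars.isalnum c && !(r.contains (String.ofList [c])) then r ++ [String.ofList [c]] else r

def pvEmit (r : List String) : List (List String) := if r ≠ [] then [r] else []

def pvG : List Char → List String → List (List String)
  | [], _ => []
  | c :: t, r =>
    if PySem.Chars.isalnum c then pvG t (pvPush r c)
    else if c = '}' then pvEmit r ++ pvG t []
    else if c = '!' then pvEmit r
    else pvG t r

def pvSplit : List Char → List (List Char)
  | [] => [[]]
  | c :: t =>
    if c = '}' then [] :: pvSplit t
    else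
      match pvSplit t with
      | [] => [[c]]
      | h :: tl => (c :: h) :: tl

def pvIdx : List Char → Option Nat
  | [] => none
  | c :: t => if c = '!' then some 0 else (pvIdx t).map (· + 1)

def pvFoldB : List (List Char) → List String → List (List String)
  | [], _ => []
  | s :: rest, r => pvEmit (s.foldl pvPush r) ++ pvFoldB rest []

def pvInv (cur : List String) (seen : PySem.Set String) : Prop :=
  ∀ v, seen.contains v = true ↔ v ∈ cur

theorem pvHeadI_tail {α : Type} [Inhabited α] (l : List α) (h : l ≠ []) : l.headI :: l.tail = l := by
  cases l with
  | nil => exact absurd rfl h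
  | cons a t => rfl

theorem pvSplit_ne_nil (l : List Char) : pvSplit l ≠ [] := by
  cases l with
  | nil => simp [pvSplit]
  | cons c t =>
    simp only [pvSplit]
    split
    · simp
    · split <;> simp

theorem pvGoSpec : ∀ (fuel : Nat) (l cur : List Char) (acc : List (List Char)),
    l.length < fuel →
    PySem.Chars.splitOn.go ['}'] fuel l cur acc =
      acc.reverse ++ ((cur.reverse ++ (pvSplit l).headI) :: (pvSplit l).tail) := by
  intro fuel
  induction fuel with
  | zero => intro l cur acc h; omega
  | succ n ih =>
    intro l cur acc h
    cases l with
    | nil => simp [PySem.Chars.splitOn.go, pvSplit]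
    | cons c t =>
      by_cases hc : c = '}'
      · subst hc
        rw [PySem.Chars.splitOn.go]
        simp only [List.isPrefixOf, List.length_cons] at *
        rw [if_pos (by simp)]
        simp only [List.length_nil, List.drop_succ_cons, List.drop_zero]
        rw [ih t [] (cur.reverse :: acc) (by simpa using h)]
        simp [pvSplit]
        exact pvHeadI_tail _ (pvSplit_ne_nil t)
      · rw [PySem.Chars.splitOn.go]
        rw [if_neg (by simp [List.isPrefixOf]; exact fun e => hc e.symm)]
        rw [ih t (c :: cur) acc (by simpa using Nat.lt_of_succ_lt_succ h)]
        simp only [pvSplit, if_neg hc]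
        rcases hsp : pvSplit t with _ | ⟨h1, tl⟩
        · exact absurd hsp (pvSplit_ne_nil t)
        · simp

theorem pvSplitOn_eq (l : List Char) : PySem.Chars.splitOn l ['}'] = pvSplit l := by
  rw [PySem.Chars.splitOn, pvGoSpec (l.length + 1) l [] [] (by omega)]
  simp [pvHeadI_tail _ (pvSplit_ne_nil l)]

theorem pvFindSpec : ∀ (l : List Char) (k : Nat),
    PySem.Chars.find.go ['!'] l k =
      (match pvIdx l with | some i => ((k + i : Nat) : Int) | none => -1) := by
  intro l
  induction l with
  | nil => intro k; simp [PySem.Chars.find.go, pvIdx]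
  | cons c t ih =>
    intro k
    rw [PySem.Chars.find.go]
    by_cases hc : c = '!'
    · subst hc; rw [if_pos (by simp [List.isPrefixOf])]; simp [pvIdx]
    · rw [if_neg (by simp [List.isPrefixOf]; exact fun e => hc e.symm)]
      rw [ih (k + 1)]
      simp only [pvIdx, if_neg hc]
      cases hp : pvIdx t with
      | none => simp
      | some i => simp; ring

theorem pvB_fold (segs : List (List Char)) (acc : List (List String)) :
    segs.foldl (fun regions seg =>
      let region := pvSegRegion seg
      if region ≠ [] then regions ++ [region] else regions) acc = acc ++ pvFoldB segs [] := by
  induction segs generalizing acc with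
  | nil => simp [pvFoldB]
  | cons s rest ih =>
    rw [List.foldl_cons, ih]
    show (if pvSegRegion s ≠ [] then acc ++ [pvSegRegion s] else acc) ++ pvFoldB rest [] = _
    have hseg : pvSegRegion s = s.foldl pvPush [] := rfl
    rw [pvFoldB, hseg, pvEmit]
    split <;> simp

-- non-alnum, non-special char is a no-op for pvPush

theorem pvPush_non_alnum (r : List String) (c : Char) (h : PySem.Chars.isalnum c = false) :
    pvPush r c = r := by simp [pvPush, h]

theorem pvMainBang : ∀ (l : List Char) (i : Nat) (r : List String),
    pvIdx l = some i → pvFoldB (pvSplit (l.take i)) r = pvG l r := by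
  intro l
  induction l with
  | nil => intro i r h; simp [pvIdx] at h
  | cons c t ih =>
    intro i r h
    by_cases hc : c = '!'
    · subst hc
      simp [pvIdx] at h
      subst h
      have h1 : PySem.Chars.isalnum '!' = false := by decide
      simp [pvSplit, pvFoldB, pvG, pvEmit, h1]
    · simp only [pvIdx, if_neg hc] at h
      rcases Option.map_eq_some_iff.mp h with ⟨j, hj, rfl⟩
      by_cases hb : c = '}'
      · subst hb
        rw [List.take_succ_cons]
        rw [show pvSplit ('}' :: t.take j) = [] :: pvSplit (t.take j) from by simp [pvSplit]]
        rw [pvFoldB, ih j [] hj]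
        have : PySem.Chars.isalnum '}' = false := by decide
        simp [pvG, this, pvEmit]
      · rw [List.take_succ_cons]
        have hsp := pvSplit_ne_nil (t.take j)
        rw [show pvSplit (c :: t.take j) =
            (c :: (pvSplit (t.take j)).headI) :: (pvSplit (t.take j)).tail from by
          simp only [pvSplit, if_neg hb]
          rcases hq : pvSplit (t.take j) with _ | ⟨h1, tl⟩
          · exact absurd hq hsp
          · simp]
        rw [pvFoldB, List.foldl_cons]
        have keyIH : pvFoldB (pvSplit (t.take j)) (pvPush r c) = pvG t (pvPush r c) := ih j _ hj
        rw [← pvHeadI_tail _ hsp, pvFoldB] at keyIH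
        rw [keyIH]
        by_cases ha : PySem.Chars.isalnum c
        · simp [pvG, ha]
        · rw [pvPush_non_alnum r c (by simpa using ha)]
          simp [pvG, ha, hc, hb]

theorem pvMainNoBang : ∀ (l : List Char) (r : List String),
    pvIdx l = none → pvFoldB ((pvSplit l).dropLast) r = pvG l r := by
  intro l
  induction l with
  | nil => intro r _; simp [pvSplit, pvFoldB, pvG]
  | cons c t ih =>
    intro r h
    simp only [pvIdx] at h
    split at h
    · exact absurd h (by simp)
    · rename_i hc
      rw [Option.map_eq_none_iff] at h
      by_cases hb : c = '}'
      · subst hb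
        rw [show pvSplit ('}' :: t) = [] :: pvSplit t from by simp [pvSplit]]
        rw [List.dropLast_cons_of_ne_nil (pvSplit_ne_nil t), pvFoldB, ih [] h]
        have h1 : PySem.Chars.isalnum '}' = false := by decide
        simp [pvG, h1, pvEmit]
      · have hsp := pvSplit_ne_nil t
        rw [show pvSplit (c :: t) =
            (c :: (pvSplit t).headI) :: (pvSplit t).tail from by
          simp only [pvSplit, if_neg hb]
          rcases hq : pvSplit t with _ | ⟨h1, tl⟩
          · exact absurd hq hsp
          · simp]
        have hGoal : pvG (c :: t) r = pvG t (pvPush r c) := by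
          by_cases ha : PySem.Chars.isalnum c
          · simp [pvG, ha]
          · rw [pvPush_non_alnum r c (by simpa using ha)]
            simp [pvG, ha, hc, hb]
        rw [hGoal, ← ih (pvPush r c) h]
        rcases hq : (pvSplit t).tail with _ | ⟨s2, rest⟩
        · -- single segment: dropLast of both sides is []
          rw [← pvHeadI_tail _ hsp, hq]
          simp [pvFoldB]
        · rw [← pvHeadI_tail _ hsp, hq]
          simp only [List.dropLast_cons_of_ne_nil (by simp : (s2 :: rest : List (List Char)) ≠ [])]
          rw [pvFoldB, pvFoldB, List.foldl_cons]
          rfl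

theorem pvSetContains {s : PySem.Set String} {v : String} : s.contains v = true ↔ v ∈ s :=
  List.contains_iff_mem

theorem pvMemAdd {s : PySem.Set String} {x v : String} : v ∈ s.add x ↔ v ∈ s ∨ v = x := by
  unfold PySem.Set.add
  split
  · rename_i h
    have hx : x ∈ s := pvSetContains.mp h
    exact ⟨Or.inl, fun h1 => h1.elim id (fun e => e ▸ hx)⟩
  · simp [List.mem_append, eq_comm]

theorem pvFlush_spec : ∀ (w : List Char) (cur : List String) (seen : PySem.Set String),
    pvInv cur seen → (∀ c ∈ w, PySem.Chars.isalnum c = true) →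
    (w.foldl pvPushA (cur, seen)).1 = w.foldl pvPush cur ∧
      pvInv (w.foldl pvPushA (cur, seen)).1 (w.foldl pvPushA (cur, seen)).2 := by
  intro w
  induction w with
  | nil => intro cur seen hinv _; exact ⟨rfl, hinv⟩
  | cons c t ih =>
    intro cur seen hinv hal
    have hac : PySem.Chars.isalnum c = true := hal c (by simp)
    have hstep : pvPushA (cur, seen) c =
        (pvPush cur c, if seen.contains (String.ofList [c]) then seen else seen.add (String.ofList [c])) := by
      by_cases hm : seen.contains (String.ofList [c]) = true
      · have hmem : String.ofList [c] ∈ cur := (hinv _).mp hm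
        simp only [pvPushA, pvPush, hm, hac, Bool.true_and,
          List.contains_iff_mem.mpr hmem, Bool.not_true, Bool.false_eq_true, if_false, if_true]
      · have hnc : String.ofList [c] ∉ cur := fun hx => hm ((hinv _).mpr hx)
        simp only [pvPushA, pvPush, hm, hac, Bool.true_and,
          mt List.contains_iff_mem.mp hnc, Bool.not_false, if_true, Bool.false_eq_true, if_false]
    have hinv' : pvInv (pvPush cur c)
        (if seen.contains (String.ofList [c]) then seen else seen.add (String.ofList [c])) := by
      intro v
      by_cases hm : seen.contains (String.ofList [c]) = true
      · have hmem : String.ofList [c] ∈ cur := (hinv _).mp hm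
        rw [if_pos hm]
        unfold pvPush
        rw [if_neg (by simp [hac]; exact hmem)]
        exact hinv v
      · have hnc : String.ofList [c] ∉ cur := fun hx => hm ((hinv _).mpr hx)
        rw [if_neg hm]
        unfold pvPush
        rw [if_pos (by simp [hac]; exact hnc)]
        rw [pvSetContains, pvMemAdd, List.mem_append, List.mem_singleton]
        rw [← pvSetContains, hinv v]
    rw [List.foldl_cons, List.foldl_cons, hstep]
    exact ih _ _ hinv' (fun x hx => hal x (by simp [hx]))

theorem pvG_alnum_nil : ∀ (w : List Char) (r : List String),
    (∀ c ∈ w, PySem.Chars.isalnum c = true) → pvG w r = [] := by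
  intro w
  induction w with
  | nil => intro r _; rfl
  | cons c t ih =>
    intro r hal
    rw [pvG, if_pos (hal c (by simp))]
    exact ih _ (fun x hx => hal x (by simp [hx]))

theorem pvG_alnum_append : ∀ (w l : List Char) (r : List String),
    (∀ c ∈ w, PySem.Chars.isalnum c = true) → pvG (w ++ l) r = pvG l (w.foldl pvPush r) := by
  intro w
  induction w with
  | nil => intro l r _; rfl
  | cons c t ih =>
    intro l r hal
    rw [List.cons_append, pvG, if_pos (hal c (by simp)), List.foldl_cons]
    exact ih _ _ (fun x hx => hal x (by simp [hx]))

theorem pvRunA_spec : ∀ (cs : List Char) (regions : List (List String)) (cur : List String)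
    (seen : PySem.Set String) (word : List Char),
    pvInv cur seen → (∀ c ∈ word, PySem.Chars.isalnum c = true) →
    pvRunA cs regions cur seen word = regions ++ pvG (word ++ cs) cur := by
  intro cs
  induction cs with
  | nil =>
    intro regions cur seen word hinv hw
    rw [pvRunA, List.append_nil, pvG_alnum_nil word cur hw, List.append_nil]
  | cons c rest ih =>
    intro regions cur seen word hinv hw
    have hflush := pvFlush_spec word cur seen hinv hw
    set f := word.foldl pvPush cur with hf
    by_cases ha : PySem.Chars.isalnum c = true
    · rw [pvRunA, if_pos ha]
      rw [ih regions cur seen (word ++ [c]) hinv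
        (by intro x hx; rcases List.mem_append.mp hx with h1 | h1
            · exact hw x h1
            · simp at h1; subst h1; exact ha)]
      simp
    · have hgtail : pvG (word ++ c :: rest) cur = pvG (c :: rest) f := by
        rw [pvG_alnum_append word _ cur hw]
      rw [pvRunA, if_neg (by simp [ha])]
      by_cases hdot : c = '.'
      · rw [if_pos hdot]
        by_cases hwnil : word = []
        · subst hwnil
          rw [if_neg (by simp)]
          rw [ih regions cur seen [] hinv (by simp)]
          rw [hgtail, hf]
          subst hdot
          rw [pvG, if_neg (by decide), if_neg (by decide), if_neg (by decide)]
          simp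
        · rw [if_pos hwnil]
          rw [ih regions _ _ [] hflush.2 (by simp)]
          rw [hflush.1, hgtail]
          subst hdot
          rw [pvG, if_neg (by decide), if_neg (by decide), if_neg (by decide)]
          simp
      · rw [if_neg hdot]
        by_cases hbr : c = '}'
        · rw [if_pos hbr]
          have hst1 : (if word ≠ [] then word.foldl pvPushA (cur, seen) else (cur, seen)).1 = f ∧
              pvInv (if word ≠ [] then word.foldl pvPushA (cur, seen) else (cur, seen)).1
                    (if word ≠ [] then word.foldl pvPushA (cur, seen) else (cur, seen)).2 := by
            by_cases hwnil : word = []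
            · subst hwnil; simp [hf, hinv]
            · rw [if_pos hwnil]; exact ⟨hflush.1, hflush.2⟩
          have hR : pvG (word ++ c :: rest) cur = pvEmit f ++ pvG rest [] := by
            rw [hgtail]
            subst hbr
            rw [pvG, if_neg (by decide), if_pos rfl]
          by_cases hfe : (if word ≠ [] then word.foldl pvPushA (cur, seen) else (cur, seen)).1 ≠ []
          · rw [if_pos hfe]
            rw [ih _ _ _ [] (by intro v; simp [PySem.Set.contains, PySem.Set.empty]) (by simp)]
            rw [hst1.1] at hfe
            rw [hR]
            have hs1 := hst1.1
            simp only [ne_eq, ite_not] at hs1 ⊢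
            simp [pvEmit, hfe, hs1]
          · rw [if_neg hfe]
            rw [ih _ _ _ [] (hst1.2) (by simp)]
            rw [not_ne_iff] at hfe
            rw [hst1.1] at hfe
            rw [hR, hfe]
            have hs1 := hst1.1
            simp only [ne_eq, ite_not] at hs1 ⊢
            simp [pvEmit, hfe, hs1]
        · rw [if_neg hbr]
          by_cases hbang : c = '!'
          · rw [if_pos hbang]
            have hst1 : (if word ≠ [] then word.foldl pvPushA (cur, seen) else (cur, seen)).1 = f := by
              by_cases hwnil : word = []
              · subst hwnil; simp [hf]
              · rw [if_pos hwnil]; exact hflush.1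
            have hR : pvG (word ++ c :: rest) cur = pvEmit f := by
              rw [hgtail]
              subst hbang
              rw [pvG, if_neg (by decide), if_neg (by decide), if_pos rfl]
            show (if (if word ≠ [] then List.foldl pvPushA (cur, seen) word else (cur, seen)).1 ≠ [] then
                regions ++ [(if word ≠ [] then List.foldl pvPushA (cur, seen) word else (cur, seen)).1]
              else regions) = regions ++ pvG (word ++ c :: rest) cur
            rw [hst1, hR]
            by_cases hfe : f ≠ []
            · rw [if_pos hfe]; simp [pvEmit, hfe]
            · rw [if_neg hfe]; rw [not_ne_iff] at hfe; simp [pvEmit, hfe]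
          · rw [if_neg hbang]
            rw [ih regions cur seen word hinv hw]
            rw [hgtail, pvG, if_neg (by simp [ha]), if_neg hbr, if_neg hbang]
            rw [pvG_alnum_append word rest cur hw]

-- ===== VERDICT (by name: the statement is the Claim_ definition above) =====
theorem parse_regions_spec : Claim_equal_parse_regions := by
  intro chain _
  unfold Spec_parse_regions
  have hA : pvRunA chain.toList [] [] PySem.Set.empty [] = pvG chain.toList [] := by
    rw [pvRunA_spec chain.toList [] [] PySem.Set.empty []
      (by intro v; simp [PySem.Set.contains, PySem.Set.empty]) (by simp)]
    simp
  rw [parse_regions, hA]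
  simp only [parse_regions_alt]
  cases hix : pvIdx chain.toList with
  | some i =>
    have hfind : PySem.Chars.find chain.toList ['!'] = (i : Int) := by
      rw [PySem.Chars.find, pvFindSpec, hix]; simp
    rw [hfind, if_pos (Int.natCast_nonneg i)]
    rw [PySem.List.slice_to _ (Int.natCast_nonneg i), Int.toNat_natCast]
    rw [pvSplitOn_eq, pvB_fold]
    rw [pvMainBang chain.toList i [] hix]
    simp
  | none =>
    have hfind : PySem.Chars.find chain.toList ['!'] = -1 := by
      rw [PySem.Chars.find, pvFindSpec, hix]
    rw [hfind, if_neg (by norm_num)]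
    rw [pvSplitOn_eq, PySem.List.slice_to_neg_one, pvB_fold]
    rw [pvMainNoBang chain.toList [] hix]
    simp
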